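-- pv_equiv track=rewrite | github.com/serabobina/Billy | BillyHerrington/Billy.py | get_finish_symb
-- ===== SOURCE A (Python) =====
-- def get_finish_symb(text, max_length):
--     length = 0
--
--     if len(text) < max_length:
--         return -1
--
--     for part in text.split('\n'):
--         part += '\n'
--         if length + len(part) > max_length:
--             return length
--
--         length += len(part)
-- ===== SOURCE B (Python) =====
-- def get_finish_symb(text, max_length):
--     if len(text) < max_length:
--         return -1
--     return text.rfind('\n', 0, max(max_length, 0)) + 1
-- ===== Notes on version B (the rewrite author's own statement) =====
-- stated objective: simpler
-- what changed: Replaces the forward split('\n') loop with a running length sum by a single direct rfind of the last newline below max(max_length,0), returning that index plus one.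
import Mathlib
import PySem

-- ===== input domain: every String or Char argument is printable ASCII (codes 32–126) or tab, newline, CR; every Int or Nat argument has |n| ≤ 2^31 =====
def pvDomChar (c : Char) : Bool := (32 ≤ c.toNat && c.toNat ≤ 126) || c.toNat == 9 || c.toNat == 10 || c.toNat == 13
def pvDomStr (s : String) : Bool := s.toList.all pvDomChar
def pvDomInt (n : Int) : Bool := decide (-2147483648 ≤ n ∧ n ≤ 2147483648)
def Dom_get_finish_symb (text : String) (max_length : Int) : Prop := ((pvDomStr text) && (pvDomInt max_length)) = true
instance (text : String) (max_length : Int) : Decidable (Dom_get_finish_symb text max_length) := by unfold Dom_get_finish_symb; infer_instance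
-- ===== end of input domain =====

-- B replaces A's forward split('\n') loop with a running sum by one rfind of the
-- last newline below max(max_length, 0); objective: simpler.

-- ===== PORT A =====
-- the for-loop of A over text.split('\n'); the [] base case is Python's fall-off-the-loop,
-- which is unreachable under the guard (proved below via gfsLoop_mySplit), so the returned value there is immaterial
def gfsLoop : List (List Char) → Int → Int → Int
  | [], length, _ => length
  | p :: rest, length, max_length =>
      let part := p ++ ['\n']
      if length + (part.length : Int) > max_length then length
      else gfsLoop rest (length + (part.length : Int)) max_length

def get_finish_symb (text : String) (max_length : Int) : Int :=
  if (PySem.Str.len text : Int) < max_length then -1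
  else gfsLoop (PySem.Chars.splitOn text.toList ['\n']) 0 max_length

-- ===== PORT B =====
def get_finish_symb_alt (text : String) (max_length : Int) : Int :=
  if (PySem.Str.len text : Int) < max_length then -1
  else PySem.Str.rfindFrom text "\n" 0 (some (max max_length 0)) + 1

-- ===== PRECONDITION & SPEC =====
def Spec_get_finish_symb (text : String) (max_length : Int) (out : Int) : Prop := out = get_finish_symb_alt text max_length
instance (text : String) (max_length : Int) (out : Int) : Decidable (Spec_get_finish_symb text max_length out) := by unfold Spec_get_finish_symb; infer_instance

-- ===== CLAIM (what is proved, stated in full; the proofs are below) =====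
def Claim_equal_get_finish_symb : Prop := ∀ (text : String) (max_length : Int), Dom_get_finish_symb text max_length → Spec_get_finish_symb text max_length (get_finish_symb text max_length)

-- ===== LEMMAS AND PROOFS =====

-- index of the last '\n' at a position < t in s, or -1
def lastNL : List Char → Nat → Int
  | _, 0 => -1
  | [], _+1 => -1
  | c :: rest, t+1 =>
      if lastNL rest t = -1 then (if c = '\n' then 0 else -1) else lastNL rest t + 1

lemma lastNL_nil (t : Nat) : lastNL [] t = -1 := by cases t <;> rfl

lemma lastNL_zero (s : List Char) : lastNL s 0 = -1 := by cases s <;> rfl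

lemma lastNL_ge (s : List Char) (t : Nat) : -1 ≤ lastNL s t := by
  induction s generalizing t with
  | nil => rw [lastNL_nil]
  | cons c rest ih =>
    cases t with
    | zero => simp [lastNL]
    | succ t =>
      simp only [lastNL]
      split_ifs <;> first | omega | (have := ih t; omega)

lemma lastNL_succ_top (s : List Char) (t : Nat) :
    lastNL s (t+1) = if s[t]? = some '\n' then (t : Int) else lastNL s t := by
  induction s generalizing t with
  | nil => simp [lastNL_nil]
  | cons c rest ih =>
    cases t with
    | zero => simp [lastNL]
    | succ t =>
      have hge := lastNL_ge rest t
      simp only [lastNL, ih t, List.getElem?_cons_succ]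
      by_cases hr : rest[t]? = some '\n'
      · rw [if_pos hr, if_pos hr, if_neg (by omega)]
        push_cast; ring
      · rw [if_neg hr, if_neg hr]

lemma lastNL_take (s : List Char) (e : Nat) : lastNL (s.take e) e = lastNL s e := by
  induction s generalizing e with
  | nil => simp
  | cons c rest ih =>
    cases e with
    | zero => rfl
    | succ e => simp only [List.take_succ_cons, lastNL, ih e]

-- structural version of PySem.Chars.splitOn with sep = ['\n']
def mySplit : List Char → List Char → List (List Char)
  | [], cur => [cur.reverse]
  | c :: rest, cur => if c = '\n' then cur.reverse :: mySplit rest [] else mySplit rest (c :: cur)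

lemma go_eq (fuel : Nat) (l cur : List Char) (acc : List (List Char)) (h : l.length ≤ fuel) :
    PySem.Chars.splitOn.go ['\n'] fuel l cur acc = acc.reverse ++ mySplit l cur := by
  induction fuel generalizing l cur acc with
  | zero =>
    have : l = [] := by cases l <;> simp_all
    subst this
    simp [PySem.Chars.splitOn.go, mySplit]
  | succ fuel ih =>
    cases l with
    | nil => simp [PySem.Chars.splitOn.go, mySplit]
    | cons c rest =>
      simp only [PySem.Chars.splitOn.go, mySplit]
      by_cases hc : c = '\n'
      · subst hc
        rw [if_pos (by simp [List.isPrefixOf])]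
        have hd : List.drop (['\n'] : List Char).length ('\n' :: rest) = rest := rfl
        rw [hd, ih rest [] _ (by simpa using h)]
        simp only [List.reverse_cons, List.append_assoc, List.singleton_append, if_pos]
      · rw [if_neg (by simp [List.isPrefixOf]; exact fun h => hc h.symm),
            ih rest (c :: cur) acc (by simpa using Nat.le_of_succ_le_succ h)]
        simp [if_neg hc]

lemma splitOn_eq (s : List Char) : PySem.Chars.splitOn s ['\n'] = mySplit s [] := by
  simpa using go_eq (s.length + 1) s [] [] (by omega)

lemma prefix_single (s : List Char) : (['\n'].isPrefixOf s) = (s[0]? == some '\n') := by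
  cases s <;> simp [List.isPrefixOf, eq_comm]

lemma rgo_eq (s : List Char) (j : Nat) :
    PySem.Chars.rfind.go s ['\n'] j = lastNL s (j+1) := by
  induction j with
  | zero =>
    rw [PySem.Chars.rfind.go, lastNL_succ_top]
    have := prefix_single s
    split_ifs with h1 h2 <;> simp_all [lastNL_zero]
  | succ j ih =>
    rw [PySem.Chars.rfind.go, lastNL_succ_top]
    have hp : (['\n'].isPrefixOf (s.drop (j+1))) = (s[j+1]? == some '\n') := by
      rw [prefix_single, List.getElem?_drop]
    rw [hp, ih]
    split_ifs with h1 h2 <;> simp_all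

lemma rfind_eq_lastNL (s : List Char) : PySem.Chars.rfind s ['\n'] = lastNL s s.length := by
  rw [PySem.Chars.rfind, rgo_eq, lastNL_succ_top]
  simp

-- the main loop invariant: A's per-part loop computes the last line boundary ≤ max_length
lemma main_loop (cs : List Char) (cur : List Char) (a m : Int)
    (h0 : 0 ≤ a) (h1 : a ≤ m) (h2 : m ≤ a + cur.length + cs.length) :
    gfsLoop (mySplit cs cur) a m =
      (if lastNL cs (m - a - cur.length).toNat = -1 then a
       else a + cur.length + 1 + lastNL cs (m - a - cur.length).toNat) := by
  induction cs generalizing cur a with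
  | nil =>
    simp only [mySplit, gfsLoop, lastNL_nil, List.length_nil] at *
    rw [if_pos (by simp; omega)]
    simp
  | cons c rest ih =>
    by_cases hc : c = '\n'
    · subst hc
      have hsp : mySplit ('\n' :: rest) cur = cur.reverse :: mySplit rest [] := by
        simp [mySplit]
      rw [hsp]
      simp only [gfsLoop]
      by_cases hfit : a + ((cur.reverse ++ ['\n']).length : Int) > m
      · rw [if_pos hfit]
        have ht : (m - a - cur.length).toNat = 0 := by simp at hfit; omega
        rw [ht]
        simp [lastNL]
      · rw [if_neg hfit]
        simp only [List.length_append, List.length_reverse, List.length_cons, List.length_nil] at hfit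
        push_cast at hfit
        simp only [List.length_cons] at h2
        push_cast at h2
        have hrec := ih [] (a + ((cur.length : Int) + 1)) (by omega) (by omega)
          (by simp only [List.length_nil]; push_cast; omega)
        have hcast : a + (((cur.reverse ++ ['\n']).length : Nat) : Int) = a + ((cur.length : Int) + 1) := by
          simp only [List.length_append, List.length_reverse, List.length_singleton]; push_cast; ring
        rw [hcast, hrec]
        have harg : (m - (a + ((cur.length : Int) + 1)) - ((([] : List Char).length : Nat) : Int)).toNat + 1
            = (m - a - (cur.length : Int)).toNat := by simp only [List.length_nil]; push_cast; omega
        rw [← harg]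
        set t := (m - (a + ((cur.length : Int) + 1)) - ((([] : List Char).length : Nat) : Int)).toNat with htdef
        have hge := lastNL_ge rest t
        simp only [lastNL, List.length_nil, reduceIte]
        by_cases hr : lastNL rest t = -1
        · simp [hr]
          omega
        · simp only [if_neg hr]
          rw [if_neg (by omega)]
          simp only [Nat.cast_zero]
          omega
    · simp only [mySplit, if_neg hc]
      have hrec := ih (c :: cur) a h0 h1 (by simp at h2 ⊢; omega)
      rw [hrec]
      have hlen : ((c :: cur).length : Int) = (cur.length : Int) + 1 := by simp
      by_cases ht0 : m - a - cur.length ≤ 0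
      · have e1 : (m - a - cur.length).toNat = 0 := by omega
        have e2 : (m - a - ((c :: cur).length : Int)).toNat = 0 := by simp; omega
        rw [e1, e2]
        simp [lastNL]
      · have e1 : (m - a - (cur.length : Int)).toNat = (m - a - ((c :: cur).length : Int)).toNat + 1 := by
          simp; omega
        rw [e1]
        set t := (m - a - ((c :: cur).length : Int)).toNat with htdef
        have hge := lastNL_ge rest t
        simp only [lastNL, if_neg hc]
        split_ifs <;> simp_all <;> omega

lemma mySplit_cons (cs cur : List Char) : ∃ p ps, mySplit cs cur = p :: ps := by
  induction cs generalizing cur with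
  | nil => exact ⟨cur.reverse, [], rfl⟩
  | cons c rest ih =>
    by_cases hc : c = '\n'
    · exact ⟨cur.reverse, mySplit rest [], by simp [mySplit, hc]⟩
    · obtain ⟨p, ps, hp⟩ := ih (c :: cur)
      exact ⟨p, ps, by simp [mySplit, hc, hp]⟩

lemma loop_neg (cs cur : List Char) (m : Int) (hm : m ≤ 0) :
    gfsLoop (mySplit cs cur) 0 m = 0 := by
  obtain ⟨p, ps, hp⟩ := mySplit_cons cs cur
  rw [hp]
  simp only [gfsLoop]
  rw [if_pos (by simp; omega)]

-- ===== VERDICT (by name: the statement is the Claim_ definition above) =====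
theorem get_finish_symb_spec : Claim_equal_get_finish_symb := by
  intro text m _
  unfold Spec_get_finish_symb get_finish_symb get_finish_symb_alt
  set s := text.toList with hs
  by_cases hguard : (PySem.Str.len text : Int) < m
  · rw [if_pos hguard, if_pos hguard]
  · rw [if_neg hguard, if_neg hguard]
    have hlen : (PySem.Str.len text : Int) = (s.length : Int) := by
      simp [PySem.Str.len_eq, hs]
    have hmn : m ≤ (s.length : Int) := by omega
    -- B side: reduce rfindFrom to lastNL
    have hB : PySem.Str.rfindFrom text "\n" 0 (some (max m 0)) = lastNL s (max m 0).toNat := by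
      rw [PySem.Str.rfindFrom_eq]
      show PySem.Chars.rfindFrom s ['\n'] 0 (some (max m 0)) = _
      rw [PySem.Chars.rfindFrom]
      have he1 : ¬ ((s.length : Int) < max m 0) := by omega
      have he2 : ¬ ((max m 0) < (0:Int)) := by omega
      simp only [he1, he2, if_false, lt_self_iff_false, Int.toNat_zero, List.drop_zero]
      rw [rfind_eq_lastNL]
      have hlt : (s.take (max m 0).toNat).length = (max m 0).toNat := by
        simp; omega
      rw [hlt, lastNL_take]
      have hge := lastNL_ge s (max m 0).toNat
      split_ifs with h1 <;> omega
    rw [hB, splitOn_eq]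
    by_cases hneg : m < 0
    · rw [loop_neg _ _ _ (by omega)]
      have : (max m 0).toNat = 0 := by omega
      rw [this, lastNL_zero]
      omega
    · have hmain := main_loop s [] 0 m (by omega) (by omega) (by simp; omega)
      rw [hmain]
      have e1 : (m - 0 - (([] : List Char).length : Int)).toNat = (max m 0).toNat := by simp; omega
      rw [e1]
      have hge := lastNL_ge s (max m 0).toNat
      simp only [List.length_nil, Nat.cast_zero]
      split_ifs with h1 <;> omega
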